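-- pv_equiv track=rewrite | github.com/FI-Mihej/Cengal | cengal/data_containers/dynamic_list_of_pieces/dynamic_list_of_pieces__cpython.py | get_num_pieces_with_full_size_lesser_than
-- ===== SOURCE A (Python) =====
-- def get_num_pieces_with_full_size_lesser_than(iter_object, full_size):
--     index = -1
--     if iter_object:
--         result_size = 0
--         index = 0
--         for piece in iter_object:
--             piece_len = len(piece)
--             if (result_size + piece_len) > full_size:
--                 break
--             else:
--                 result_size += piece_len
--                 index += 1
--     return index
-- ===== SOURCE B (Python) =====
-- from bisect import bisect_right
-- from itertools import accumulate
--
--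
-- def get_num_pieces_with_full_size_lesser_than(iter_object, full_size):
--     if not iter_object:
--         return -1
--     # cumulative sizes are nondecreasing (lengths are >= 0), so the number of
--     # pieces whose cumulative size stays within the limit is found by binary search
--     prefix = list(accumulate(len(piece) for piece in iter_object))
--     return bisect_right(prefix, full_size)
-- ===== Notes on version B (the rewrite author's own statement) =====
-- stated objective: alternative
-- what changed: Instead of A's early-exit accumulator loop, B materialises the cumulative piece sizes once and binary-searches (bisect_right) the nondecreasing prefix-sum list for the count of sums within the limit.
import Mathlib
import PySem

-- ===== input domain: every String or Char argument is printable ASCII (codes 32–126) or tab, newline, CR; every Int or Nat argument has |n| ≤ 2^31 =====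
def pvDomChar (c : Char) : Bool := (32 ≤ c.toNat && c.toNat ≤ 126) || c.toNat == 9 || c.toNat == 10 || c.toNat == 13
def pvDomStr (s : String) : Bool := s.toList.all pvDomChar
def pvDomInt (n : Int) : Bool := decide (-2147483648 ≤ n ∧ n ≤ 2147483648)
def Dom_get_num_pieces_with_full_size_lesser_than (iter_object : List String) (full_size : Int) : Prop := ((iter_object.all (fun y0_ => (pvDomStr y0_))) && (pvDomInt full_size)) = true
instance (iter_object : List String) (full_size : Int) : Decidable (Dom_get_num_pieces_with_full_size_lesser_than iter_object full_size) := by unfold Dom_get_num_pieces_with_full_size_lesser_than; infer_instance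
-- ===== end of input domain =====

-- B replaces A's early-exit accumulator loop by a staged computation: build the
-- cumulative piece sizes once, then bisect_right the nondecreasing prefix-sum list (alternative algorithm).

-- ===== PORT A =====
-- the for-loop of A with its `break`: state (result_size, index)
def pvGoA (full_size : Int) : List String → Int → Int → Int
  | [], _, index => index
  | piece :: rest, result_size, index =>
      let piece_len := PySem.Str.len piece
      if result_size + piece_len > full_size then index
      else pvGoA full_size rest (result_size + piece_len) (index + 1)

def get_num_pieces_with_full_size_lesser_than (iter_object : List String) (full_size : Int) : Int :=
  match iter_object with
  | [] => -1   -- `if iter_object:` false on the empty list: index stays -1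
  | _ => pvGoA full_size iter_object 0 0

-- ===== PORT B =====
def get_num_pieces_with_full_size_lesser_than_alt (iter_object : List String) (full_size : Int) : Int :=
  if iter_object.isEmpty then -1
  else
    -- prefix = list(accumulate(len(piece) for piece in iter_object))
    let pref := ((iter_object.map (fun piece => PySem.Str.len piece)).scanl (· + ·) 0).tail
    -- bisect_right(prefix, full_size)  (stdlib call → PySem.List.bisectRight)
    (PySem.List.bisectRight pref full_size : Int)

-- ===== PRECONDITION & SPEC =====
def Spec_get_num_pieces_with_full_size_lesser_than (iter_object : List String) (full_size : Int) (out : Int) : Prop := out = get_num_pieces_with_full_size_lesser_than_alt iter_object full_size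
instance (iter_object : List String) (full_size : Int) (out : Int) : Decidable (Spec_get_num_pieces_with_full_size_lesser_than iter_object full_size out) := by unfold Spec_get_num_pieces_with_full_size_lesser_than; infer_instance

-- ===== CLAIM (what is proved, stated in full; the proofs are below) =====
def Claim_equal_get_num_pieces_with_full_size_lesser_than : Prop := ∀ (iter_object : List String) (full_size : Int), Dom_get_num_pieces_with_full_size_lesser_than iter_object full_size → Spec_get_num_pieces_with_full_size_lesser_than iter_object full_size (get_num_pieces_with_full_size_lesser_than iter_object full_size)

-- ===== LEMMAS AND PROOFS =====

-- a scanl is nonempty and headed by its seed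
theorem pv_scanl_head_tail (b : Int) (l : List Int) :
    l.scanl (· + ·) b = b :: (l.scanl (· + ·) b).tail := by
  cases l <;> simp [List.scanl_nil, List.scanl_cons]

-- loop invariant: A's loop from state (rs, idx) adds the length of the
-- within-limit prefix of the cumulative sums started at rs
theorem pvGoA_eq (full_size : Int) :
    ∀ (l : List String) (rs idx : Int),
      pvGoA full_size l rs idx =
        idx + ((((l.map (fun p => PySem.Str.len p)).scanl (· + ·) rs).tail.takeWhile
                  (fun s => decide (s ≤ full_size))).length : Int) := by
  intro l
  induction l with
  | nil => intro rs idx; simp [pvGoA, List.scanl_nil]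
  | cons p rest ih =>
      intro rs idx
      simp only [pvGoA, List.map_cons, List.scanl_cons, List.tail_cons]
      rw [pv_scanl_head_tail (rs + PySem.Str.len p), List.takeWhile_cons]
      by_cases h : rs + PySem.Str.len p ≤ full_size
      · rw [if_neg (not_lt.mpr h), if_pos (by simpa using h), ih]
        simp only [List.length_cons]
        push_cast; ring
      · rw [if_pos (lt_of_not_ge h), if_neg (by simpa using h)]
        simp

-- a scanl of nonnegative increments is a nondecreasing chain
theorem pv_chain_scanl (l : List Int) (hl : ∀ y ∈ l, 0 ≤ y) :
    ∀ b : Int, List.IsChain (· ≤ ·) (l.scanl (· + ·) b) := by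
  induction l with
  | nil => intro b; simp [List.scanl_nil]
  | cons y t ih =>
      intro b
      rw [List.scanl_cons, pv_scanl_head_tail (b + y) t, List.isChain_cons_cons]
      refine ⟨le_add_of_nonneg_right (hl y (by simp)), ?_⟩
      rw [← pv_scanl_head_tail (b + y) t]
      exact ih (fun z hz => hl z (by simp [hz])) (b + y)

-- on any list, if p holds on the first r elements and fails from index r on,
-- then takeWhile p has length exactly r
theorem pv_takeWhile_length (p : Int → Bool) :
    ∀ (xs : List Int) (r : Nat), r ≤ xs.length →
      (∀ (j : Nat) (hj : j < xs.length), j < r → p xs[j] = true) →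
      (∀ (j : Nat) (hj : j < xs.length), r ≤ j → p xs[j] = false) →
      (xs.takeWhile p).length = r := by
  intro xs
  induction xs with
  | nil => intro r hr _ _; simp at hr ⊢; omega
  | cons x t ih =>
      intro r hr htrue hfalse
      cases r with
      | zero =>
          have h0 : p x = false := by simpa using hfalse 0 (by simp) (Nat.le_refl 0)
          simp [h0]
      | succ s =>
          have hx : p x = true := by simpa using htrue 0 (by simp) (Nat.succ_pos s)
          rw [List.takeWhile_cons, if_pos hx]
          simp only [List.length_cons]
          have := ih s (by simpa using hr)
            (fun j hj hjr => by simpa using htrue (j+1) (by simpa using hj) (by omega))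
            (fun j hj hjr => by simpa using hfalse (j+1) (by simpa using hj) (by omega))
          omega

-- bisect_right on a sorted list counts the elements ≤ x
theorem pv_bisectRight_eq_takeWhile (xs : List Int) (x : Int)
    (hs : List.Pairwise (· ≤ ·) xs) :
    (PySem.List.bisectRight xs x : Int) =
      ((xs.takeWhile (fun s => decide (s ≤ x))).length : Int) := by
  obtain ⟨hle, hlt, hgt⟩ := PySem.List.bisectRight_spec xs x hs
  rw [pv_takeWhile_length _ xs (PySem.List.bisectRight xs x) hle
    (fun j hj hjr => by simpa using hlt j hj hjr)
    (fun j hj hjr => by simpa using not_le.mpr (hgt j hj hjr))]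

-- ===== VERDICT (by name: the statement is the Claim_ definition above) =====
theorem get_num_pieces_with_full_size_lesser_than_spec : Claim_equal_get_num_pieces_with_full_size_lesser_than := by
  intro iter_object full_size _
  unfold Spec_get_num_pieces_with_full_size_lesser_than
  cases iter_object with
  | nil => rfl
  | cons p rest =>
      simp only [get_num_pieces_with_full_size_lesser_than,
        get_num_pieces_with_full_size_lesser_than_alt, List.isEmpty_cons]
      rw [pvGoA_eq full_size (p :: rest) 0 0]
      have hnn : ∀ y ∈ (p :: rest).map (fun q => PySem.Str.len q), 0 ≤ y := by
        intro y hy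
        simp only [List.mem_map] at hy
        obtain ⟨q, _, rfl⟩ := hy
        rw [PySem.Str.len_eq]; exact Int.natCast_nonneg _
      have hchain := pv_chain_scanl _ hnn 0
      have hpair : List.Pairwise (· ≤ ·)
          (((p :: rest).map (fun q => PySem.Str.len q)).scanl (· + ·) 0).tail := by
        have := hchain.pairwise
        rw [pv_scanl_head_tail 0] at this
        exact (List.pairwise_cons.mp this).2
      rw [pv_bisectRight_eq_takeWhile _ full_size hpair]
      simp
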